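-- pv_equiv track=rewrite | github.com/mihir-s-05/persona-debate | src/debate_v_majority/personas/generator.py | _sum_token_counts
-- ===== SOURCE A (Python) =====
-- from typing import Any
--
-- def _sum_token_counts(rows: list[dict[str, Any] | None]) -> dict[str, int]:
--     valid = [row for row in rows if row is not None]
--     return {
--         "n_calls": len(valid),
--         "input_tokens": sum(int((row.get("token_counts") or {}).get("input_tokens") or 0) for row in valid),
--         "output_tokens": sum(int((row.get("token_counts") or {}).get("output_tokens") or 0) for row in valid),
--         "total_tokens": sum(int((row.get("token_counts") or {}).get("total_tokens") or 0) for row in valid),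
--     }
-- ===== SOURCE B (Python) =====
-- def _sum_token_counts(rows):
--     KEYS = ("n_calls", "input_tokens", "output_tokens", "total_tokens")
--
--     def leaf(row):
--         if row is None:
--             return {k: 0 for k in KEYS}
--         tc = row.get("token_counts") or {}
--         return {
--             "n_calls": 1,
--             "input_tokens": int(tc.get("input_tokens") or 0),
--             "output_tokens": int(tc.get("output_tokens") or 0),
--             "total_tokens": int(tc.get("total_tokens") or 0),
--         }
--
--     def go(lo, hi):
--         n = hi - lo
--         if n <= 1:
--             return leaf(rows[lo]) if n == 1 else {k: 0 for k in KEYS}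
--         mid = (lo + hi) // 2
--         left, right = go(lo, mid), go(mid, hi)
--         return {k: left[k] + right[k] for k in KEYS}
--
--     return go(0, len(rows))
-- ===== Notes on version B (the rewrite author's own statement) =====
-- stated objective: alternative
-- what changed: Replaces A's filtered intermediate list plus three linear sum() generator scans with a recursive divide-and-conquer tree reduction over index ranges: each half-range is summarised into a four-key dict and halves are combined by key-wise dict addition.
import Mathlib
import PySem

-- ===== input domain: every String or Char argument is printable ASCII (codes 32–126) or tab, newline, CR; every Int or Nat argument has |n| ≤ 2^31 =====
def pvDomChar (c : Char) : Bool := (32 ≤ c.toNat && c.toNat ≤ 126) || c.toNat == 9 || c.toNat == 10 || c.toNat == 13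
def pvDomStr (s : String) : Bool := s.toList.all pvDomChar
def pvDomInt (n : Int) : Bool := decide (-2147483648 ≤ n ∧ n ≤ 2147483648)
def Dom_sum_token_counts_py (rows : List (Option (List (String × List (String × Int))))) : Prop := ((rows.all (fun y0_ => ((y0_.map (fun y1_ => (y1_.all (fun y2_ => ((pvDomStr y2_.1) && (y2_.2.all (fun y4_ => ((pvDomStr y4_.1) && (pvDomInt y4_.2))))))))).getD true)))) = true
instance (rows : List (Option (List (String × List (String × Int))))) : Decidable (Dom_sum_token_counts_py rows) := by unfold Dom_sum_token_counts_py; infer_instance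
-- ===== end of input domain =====

-- B replaces A's filtered list + three sum() generator scans by a divide-and-conquer
-- tree reduction over index ranges, combining per-half four-key dicts by key-wise
-- addition (objective: alternative algorithm, same O(n) work).

-- ===== PORT A =====
-- `int((row.get("token_counts") or {}).get(k) or 0)` for one valid row; `or {}` maps a
-- missing token_counts to {}, `or 0` maps a missing value to 0 (a falsy present 0 also
-- yields 0, the same value), int() is identity on int.
def aTok (row : List (String × List (String × Int))) (k : String) : Int :=
  let tc : List (String × Int) :=
    match (PySem.Dict.mk row).get? "token_counts" with
    | some t => t
    | none => []
  match (PySem.Dict.mk tc).get? k with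
  | some v => v
  | none => 0

-- one `sum(… for row in valid)` generator
def aSum (valid : List (List (String × List (String × Int)))) (k : String) : Int :=
  valid.foldl (fun s row => s + aTok row k) 0

def sum_token_counts_py (rows : List (Option (List (String × List (String × Int))))) : List (String × Int) :=
  let valid := rows.filterMap (fun row => row)   -- [row for row in rows if row is not None]
  [("n_calls", (valid.length : Int)),
   ("input_tokens", aSum valid "input_tokens"),
   ("output_tokens", aSum valid "output_tokens"),
   ("total_tokens", aSum valid "total_tokens")]

-- ===== PORT B =====
-- KEYS
def bKEYS : List String := ["n_calls", "input_tokens", "output_tokens", "total_tokens"]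

-- {k: 0 for k in KEYS}
def bZero : List (String × Int) := bKEYS.map (fun k => (k, 0))

-- int(tc.get(k) or 0): a missing key or a falsy present 0 both give 0
def bTok (tc : List (String × Int)) (k : String) : Int :=
  ((PySem.Dict.mk tc).get? k).getD 0

-- leaf(row)
def bLeaf (row : Option (List (String × List (String × Int)))) : List (String × Int) :=
  match row with
  | none => bZero
  | some r =>
    let tc := ((PySem.Dict.mk r).get? "token_counts").getD []   -- row.get("token_counts") or {}
    [("n_calls", 1),
     ("input_tokens", bTok tc "input_tokens"),
     ("output_tokens", bTok tc "output_tokens"),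
     ("total_tokens", bTok tc "total_tokens")]

-- d[k]; in go the key is always one of KEYS, present in both halves, so getD 0 is exact
def bGet (d : List (String × Int)) (k : String) : Int :=
  ((PySem.Dict.mk d).get? k).getD 0

-- {k: left[k] + right[k] for k in KEYS}
def bMerge (x y : List (String × Int)) : List (String × Int) :=
  bKEYS.map (fun k => (k, bGet x k + bGet y k))

-- go(lo, hi): tree reduction on the index range [lo, hi); rows[lo] is only read with
-- 0 ≤ lo < len (n = 1 guarantees it at every call from below), so getD none is exact
def bGo (rows : List (Option (List (String × List (String × Int))))) (lo hi : Int) :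
    List (String × Int) :=
  let n := hi - lo
  if n ≤ 1 then
    if n = 1 then bLeaf ((PySem.List.pyGet? rows lo).getD none) else bZero
  else
    let mid := PySem.Int.floordiv (lo + hi) 2
    bMerge (bGo rows lo mid) (bGo rows mid hi)
termination_by (hi - lo).toNat
decreasing_by
  · rw [PySem.Int.floordiv_eq_ediv_of_pos (by omega)]; omega
  · rw [PySem.Int.floordiv_eq_ediv_of_pos (by omega)]; omega

def sum_token_counts_py_alt (rows : List (Option (List (String × List (String × Int))))) :
    List (String × Int) :=
  bGo rows 0 rows.length

-- ===== PRECONDITION & SPEC =====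
def Spec_sum_token_counts_py (rows : List (Option (List (String × List (String × Int))))) (out : List (String × Int)) : Prop := out = sum_token_counts_py_alt rows
instance (rows : List (Option (List (String × List (String × Int))))) (out : List (String × Int)) : Decidable (Spec_sum_token_counts_py rows out) := by unfold Spec_sum_token_counts_py; infer_instance

-- ===== CLAIM (what is proved, stated in full; the proofs are below) =====
def Claim_equal_sum_token_counts_py : Prop := ∀ (rows : List (Option (List (String × List (String × Int))))), Dom_sum_token_counts_py rows → Spec_sum_token_counts_py rows (sum_token_counts_py rows)

-- ===== LEMMAS AND PROOFS =====

-- A's four statistics of a row list, rendered as the four-key output dict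
def render (rs : List (Option (List (String × List (String × Int))))) : List (String × Int) :=
  let valid := rs.filterMap (fun row => row)
  [("n_calls", (valid.length : Int)),
   ("input_tokens", aSum valid "input_tokens"),
   ("output_tokens", aSum valid "output_tokens"),
   ("total_tokens", aSum valid "total_tokens")]

lemma aTok_eq_bTok (row : List (String × List (String × Int))) (k : String) :
    aTok row k = bTok (((PySem.Dict.mk row).get? "token_counts").getD []) k := by
  unfold aTok bTok
  cases (PySem.Dict.mk row).get? "token_counts" <;>
    cases h : (PySem.Dict.mk _).get? k <;> simp_all

-- a leaf is A's summary of the singleton list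
lemma bLeaf_eq_render (row : Option (List (String × List (String × Int)))) :
    bLeaf row = render [row] := by
  cases row <;> simp [bLeaf, bZero, bKEYS, render, aSum, aTok_eq_bTok]

lemma aSum_append (u v : List (List (String × List (String × Int)))) (k : String) :
    aSum (u ++ v) k = aSum u k + aSum v k := by
  unfold aSum
  rw [PySem.List.foldl_add, PySem.List.foldl_add, PySem.List.foldl_add]
  simp [List.map_append]

-- merging the summaries of two row lists is the summary of their concatenation
lemma bMerge_render (u v : List (Option (List (String × List (String × Int))))) :
    bMerge (render u) (render v) = render (u ++ v) := by
  simp [bMerge, bGet, bKEYS, render, List.filterMap_append, aSum_append, PySem.Dict.get?]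

-- the tree reduction over [lo, hi) computes A's summary of rows[lo:hi]
lemma bGo_eq_render (rows : List (Option (List (String × List (String × Int)))))
    (lo hi : Int) (h0 : 0 ≤ lo) (h1 : lo ≤ hi) (h2 : hi ≤ rows.length) :
    bGo rows lo hi = render ((rows.drop lo.toNat).take (hi - lo).toNat) := by
  generalize hfuel : (hi - lo).toNat = fuel
  induction fuel using Nat.strong_induction_on generalizing lo hi with
  | _ fuel ih =>
    subst hfuel
    rw [bGo]
    by_cases hle : hi - lo ≤ 1
    · by_cases h1' : hi - lo = 1
      · have hlt : lo.toNat < rows.length := by omega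
        rw [h1']
        norm_num
        rw [PySem.List.pyGet?_of_nonneg rows h0, List.getElem?_eq_getElem hlt]
        have htake : (rows.drop lo.toNat).take 1 = [rows[lo.toNat]] := by
          rw [List.take_one, List.head?_drop, List.getElem?_eq_getElem hlt]
          rfl
        rw [htake, bLeaf_eq_render]; rfl
      · have : hi = lo := by omega
        simp [this, render, aSum, bZero, bKEYS]
    · simp only [hle, if_false]
      have hmid := PySem.Int.floordiv_two_mid_bounds (lo := lo) (hi := hi) h1
      set mid := PySem.Int.floordiv (lo + hi) 2 with hm
      have hmid2 : lo < mid ∧ mid < hi := by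
        rw [hm, PySem.Int.floordiv_eq_ediv_of_pos (by omega)]; omega
      have e1 := ih (mid - lo).toNat (by omega) lo mid h0 (by omega) (by omega) rfl
      have e2 := ih (hi - mid).toNat (by omega) mid hi (by omega) (by omega) h2 rfl
      rw [e1, e2, bMerge_render]
      congr 1
      rw [show (hi - lo).toNat = (mid - lo).toNat + (hi - mid).toNat by omega,
          List.take_add]
      congr 1
      rw [List.drop_drop, show lo.toNat + (mid - lo).toNat = mid.toNat by omega]

-- ===== VERDICT (by name: the statement is the Claim_ definition above) =====
theorem sum_token_counts_py_spec : Claim_equal_sum_token_counts_py := by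
  intro rows _
  unfold Spec_sum_token_counts_py sum_token_counts_py sum_token_counts_py_alt
  rw [bGo_eq_render rows 0 rows.length le_rfl (by positivity) le_rfl]
  simp [render]
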